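-- pv_equiv track=rewrite | github.com/angelikaziolkowska/k-Means-and-k-Medians-Data-Clustering | main.py | getACounts
-- ===== SOURCE A (Python) =====
-- def getACounts(clusterAndActualPairCount):
--     countInA = []
--     for i in range(4):
--         c = 0
--         for p in clusterAndActualPairCount:
--             if p[1] == i:
--                 c += clusterAndActualPairCount[p]
--         countInA.append(c)
--     return countInA
-- ===== SOURCE B (Python) =====
-- def getACounts(clusterAndActualPairCount):
--     counts = {0: 0, 1: 0, 2: 0, 3: 0}
--     for key, v in clusterAndActualPairCount.items():
--         b = key[1]
--         if b in counts:
--             counts[b] += v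
--     return [counts[i] for i in range(4)]
-- ===== Notes on version B (the rewrite author's own statement) =====
-- stated objective: faster
-- what changed: B replaces A's four repeated filtered scans (each with a dict lookup per matching key) by one single grouping pass over the dict items accumulating the four bucket sums at once.
import Mathlib
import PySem

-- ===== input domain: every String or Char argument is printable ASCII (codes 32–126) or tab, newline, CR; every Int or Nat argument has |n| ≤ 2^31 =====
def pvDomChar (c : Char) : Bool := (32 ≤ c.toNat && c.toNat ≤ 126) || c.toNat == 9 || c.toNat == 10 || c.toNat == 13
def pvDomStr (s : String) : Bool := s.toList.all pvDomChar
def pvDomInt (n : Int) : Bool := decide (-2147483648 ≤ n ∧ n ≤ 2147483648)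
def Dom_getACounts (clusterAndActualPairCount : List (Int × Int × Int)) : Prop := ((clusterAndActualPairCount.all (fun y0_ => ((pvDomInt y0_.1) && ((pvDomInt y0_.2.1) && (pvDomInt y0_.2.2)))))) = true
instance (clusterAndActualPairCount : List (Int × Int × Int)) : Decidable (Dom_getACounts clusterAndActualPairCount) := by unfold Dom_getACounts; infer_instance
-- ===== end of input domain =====

-- B makes one grouping pass over the dict items with a four-bucket accumulator
-- instead of A's four repeated filtered scans with a dict lookup per hit.
-- The dict parameter is modelled as an association list; equivalence is over lists
-- whose keys are distinct (Pre_), i.e. exactly the lists that represent a Python dict.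

-- ===== PORT A =====
-- 'clusterAndActualPairCount[p]': dict lookup of key p = (p.1, p.2.1); first match.
-- (the 'none' branch is unreachable when p comes from the dict itself)
def pvLookup (d : List (Int × Int × Int)) (k : Int × Int) : Int :=
  match d.find? (fun q => q.1 == k.1 && q.2.1 == k.2) with
  | some q => q.2.2
  | none => 0

def getACounts (clusterAndActualPairCount : List (Int × Int × Int)) : List Int :=
  (PySem.List.pyRange 0 4 1).foldl
    (fun countInA i =>
      countInA ++
        [clusterAndActualPairCount.foldl
          (fun c p =>
            if p.2.1 == i then c + pvLookup clusterAndActualPairCount (p.1, p.2.1) else c)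
          0])
    []

-- ===== PORT B =====
-- counts = {0:0, 1:0, 2:0, 3:0}, carried as a 4-tuple of bucket sums.
def pvStep (s : Int × Int × Int × Int) (p : Int × Int × Int) : Int × Int × Int × Int :=
  if p.2.1 == 0 then (s.1 + p.2.2, s.2.1, s.2.2.1, s.2.2.2)
  else if p.2.1 == 1 then (s.1, s.2.1 + p.2.2, s.2.2.1, s.2.2.2)
  else if p.2.1 == 2 then (s.1, s.2.1, s.2.2.1 + p.2.2, s.2.2.2)
  else if p.2.1 == 3 then (s.1, s.2.1, s.2.2.1, s.2.2.2 + p.2.2)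
  else s

def getACounts_alt (clusterAndActualPairCount : List (Int × Int × Int)) : List Int :=
  let s := clusterAndActualPairCount.foldl pvStep (0, 0, 0, 0)
  [s.1, s.2.1, s.2.2.1, s.2.2.2]

-- ===== PRECONDITION & SPEC =====
-- Pre_ excludes association lists with a repeated key (a, b): those represent no
-- Python dict at all (dict keys are unique), so A is never run on them.
def Pre_getACounts (clusterAndActualPairCount : List (Int × Int × Int)) : Prop :=
  clusterAndActualPairCount.Pairwise (fun x y => (x.1, x.2.1) ≠ (y.1, y.2.1))
instance (clusterAndActualPairCount : List (Int × Int × Int)) : Decidable (Pre_getACounts clusterAndActualPairCount) := by unfold Pre_getACounts; infer_instance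

def pvWitness_getACounts : (List (Int × Int × Int)) := [(5, 0, 2), (5, 1, 3), (7, 0, 4), (1, 9, 8)]

def Spec_getACounts (clusterAndActualPairCount : List (Int × Int × Int)) (out : List Int) : Prop := out = getACounts_alt clusterAndActualPairCount
instance (clusterAndActualPairCount : List (Int × Int × Int)) (out : List Int) : Decidable (Spec_getACounts clusterAndActualPairCount out) := by unfold Spec_getACounts; infer_instance

-- ===== CLAIM (what is proved, stated in full; the proofs are below) =====
def Claim_equal_getACounts : Prop := ∀ (clusterAndActualPairCount : List (Int × Int × Int)), Dom_getACounts clusterAndActualPairCount → Pre_getACounts clusterAndActualPairCount → Spec_getACounts clusterAndActualPairCount (getACounts clusterAndActualPairCount)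

-- ===== LEMMAS AND PROOFS =====

-- the bucket sum both programs compute
def pvT (i : Int) (d : List (Int × Int × Int)) : Int :=
  (d.map (fun p => if p.2.1 = i then p.2.2 else 0)).sum

theorem pvLookup_self (d : List (Int × Int × Int))
    (hnd : List.Pairwise (fun x y => (x.1, x.2.1) ≠ (y.1, y.2.1)) d)
    (p : Int × Int × Int) (hp : p ∈ d) :
    pvLookup d (p.1, p.2.1) = p.2.2 := by
  induction d with
  | nil => cases hp
  | cons q t ih =>
    rcases List.pairwise_cons.mp hnd with ⟨hq, ht⟩
    rcases List.mem_cons.mp hp with hp | hp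
    · subst hp; simp [pvLookup]
    · have hne : ¬(q.1 == p.1 && q.2.1 == p.2.1) = true := by
        have := hq p hp
        simp only [ne_eq, Prod.mk.injEq] at this
        simp only [Bool.and_eq_true, beq_iff_eq]
        tauto
      simpa [pvLookup, hne] using ih ht hp

theorem pvFoldA (i : Int) (d : List (Int × Int × Int)) :
    d.foldl (fun c p => if p.2.1 == i then c + p.2.2 else c) 0 = pvT i d := by
  have h := PySem.List.foldl_add (l := d) (a := (0 : Int))
      (g := fun p : Int × Int × Int => if p.2.1 = i then p.2.2 else 0)
  have hf : (fun (c : Int) (p : Int × Int × Int) => if p.2.1 == i then c + p.2.2 else c)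
      = (fun c p => c + if p.2.1 = i then p.2.2 else 0) := by
    funext c p; by_cases h : p.2.1 = i <;> simp [h]
  rw [hf, pvT]
  simpa using h

theorem pvFoldB (d : List (Int × Int × Int)) (s : Int × Int × Int × Int) :
    d.foldl pvStep s = (s.1 + pvT 0 d, s.2.1 + pvT 1 d, s.2.2.1 + pvT 2 d, s.2.2.2 + pvT 3 d) := by
  induction d generalizing s with
  | nil => simp [pvT]
  | cons p t ih =>
    simp only [List.foldl_cons, ih, pvT, List.map_cons, List.sum_cons, pvStep]
    by_cases h0 : p.2.1 = 0
    · simp [h0]; ring_nf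
    · by_cases h1 : p.2.1 = 1
      · simp [h1]; ring_nf
      · by_cases h2 : p.2.1 = 2
        · simp [h2]; ring_nf
        · by_cases h3 : p.2.1 = 3
          · simp [h3]; ring_nf
          · simp [h0, h1, h2, h3]

-- ===== VERDICT (by name: the statement is the Claim_ definition above) =====
theorem getACounts_spec : Claim_equal_getACounts := by
  intro d _ hpre
  unfold Spec_getACounts getACounts getACounts_alt
  have hr : PySem.List.pyRange 0 4 1 = [0, 1, 2, 3] := by decide
  rw [hr, PySem.List.foldl_append_singleton_eq_map]
  have hinner : ∀ i : Int,
      d.foldl (fun c p => if p.2.1 == i then c + pvLookup d (p.1, p.2.1) else c) 0 = pvT i d := by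
    intro i
    have hcongr := PySem.List.foldl_congr_mem (l := d) (init := (0 : Int))
      (f := fun c p => if p.2.1 == i then c + pvLookup d (p.1, p.2.1) else c)
      (g := fun c p => if p.2.1 == i then c + p.2.2 else c)
      (by intro c p hp
          simp only [pvLookup_self d hpre p hp])
    rw [hcongr]
    exact pvFoldA i d
  simp only [List.map_cons, List.map_nil, hinner, pvFoldB]
  simp
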